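-- pv_equiv track=rewrite | github.com/Bihanojko/School-Projects | 4. term/IPP/Project 2/cls.py | delete_conflicts
-- ===== SOURCE A (Python) =====
-- def delete_conflicts(in_data_parsed, classname, conflict):
-- 	for i, class_definition in enumerate(in_data_parsed):
-- 		if class_definition[1] != [""]:
-- 			for inherit_class in class_definition[1]:
-- 				if inherit_class[0] == classname:
-- 					delete = []
-- 					for j, attribute in enumerate(class_definition[2]):
-- 						if attribute[11] == classname:
-- 							for index in range(11):
-- 								if attribute[index] != conflict[index]:
-- 									break
-- 								if index == 10:
-- 									delete.append(j)
--
-- 					if delete != []: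
-- 						delete.sort()
-- 						delete = list(set(delete))
-- 						for index in reversed(delete):
-- 							del in_data_parsed[i][2][index]
--
-- 	return in_data_parsed
-- ===== SOURCE B (Python) =====
-- def delete_conflicts(in_data_parsed, classname, conflict):
--     # Same return value and in-place mutation as A on the stated domain:
--     # one filtered rebuild per class instead of collect/sort/dedup/reverse-delete.
--     for class_definition in in_data_parsed:
--         if class_definition[1] != [""] and any(ic[0] == classname for ic in class_definition[1]):
--             class_definition[2][:] = [
--                 attr for attr in class_definition[2]
--                 if not (attr[11] == classname and all(attr[k] == conflict[k] for k in range(11)))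
--             ]
--     return in_data_parsed
-- ===== Notes on version B (the rewrite author's own statement) =====
-- stated objective: simpler
-- what changed: The per-class 'collect matching indices, sort, dedup via set(), delete in reverse' machinery is replaced by a single filtered rebuild of the attribute list, with an any() scan over the inherit list instead of repeating the whole deletion block per inherit entry.
import Mathlib
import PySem

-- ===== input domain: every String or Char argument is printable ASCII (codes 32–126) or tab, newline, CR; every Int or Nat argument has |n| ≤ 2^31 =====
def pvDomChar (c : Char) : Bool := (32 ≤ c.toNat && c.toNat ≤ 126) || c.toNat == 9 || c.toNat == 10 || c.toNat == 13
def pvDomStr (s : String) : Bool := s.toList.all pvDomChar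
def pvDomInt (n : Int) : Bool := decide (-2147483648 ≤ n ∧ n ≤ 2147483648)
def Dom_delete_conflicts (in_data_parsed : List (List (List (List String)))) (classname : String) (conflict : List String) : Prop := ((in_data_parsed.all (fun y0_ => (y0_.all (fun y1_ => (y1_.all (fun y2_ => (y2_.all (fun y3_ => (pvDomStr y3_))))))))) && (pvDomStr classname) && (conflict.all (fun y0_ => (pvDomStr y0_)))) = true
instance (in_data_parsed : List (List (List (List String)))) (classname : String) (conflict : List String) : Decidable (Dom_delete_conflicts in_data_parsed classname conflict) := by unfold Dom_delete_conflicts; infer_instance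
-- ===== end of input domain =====

-- B replaces A's per-class 'collect indices / sort / set() / delete in reverse' block by one filtered
-- rebuild of the attribute list (objective: simpler). Both Pythons mutate in_data_parsed in place the
-- same way on Pre_; the equivalence proved here is about the returned value.
-- NOTE on the typed domain: class_definition[1] is a list of lists, so Python's
-- 'class_definition[1] != [""]' (a list holding a string on the right) is identically True;
-- both ports therefore carry no test for it.

-- ===== PORT A =====

-- inherit_class[0] == classname  ([] raises IndexError in Python; excluded by Pre_)
def fcEq (ic : List String) (classname : String) : Bool :=
  match ic with
  | [] => false
  | s :: _ => s == classname

-- 'for index in range(11): if attribute[index] != conflict[index]: break; if index == 10: append'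
-- (fuel = remaining iterations; out-of-range indexing raises in Python and is excluded by Pre_)
def cmp11 (attr conflict : List String) (index : Nat) : Nat → Bool
  | 0 => false
  | fuel+1 =>
    if attr.getD index "" != conflict.getD index "" then false
    else if index == 10 then true
    else cmp11 attr conflict (index+1) fuel

-- 'delete = []; for j, attribute in enumerate(class_definition[2]): …'
def collectA (attrs : List (List String)) (classname : String) (conflict : List String) : List Int :=
  (PySem.List.enumerate attrs).foldl
    (fun delete ja =>
      if ja.2.getD 11 "" == classname then
        (if cmp11 ja.2 conflict 0 11 then delete ++ [ja.1] else delete)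
      else delete) []

-- 'for index in reversed(delete): del in_data_parsed[i][2][index]'  (indices here are in range and ≥ 0)
def applyDelA (attrs : List (List String)) (delete : List Int) : List (List String) :=
  delete.reverse.foldl (fun l i => l.eraseIdx i.toNat) attrs

-- 'for inherit_class in class_definition[1]: …' (attrs is the current in_data_parsed[i][2])
def procA (classname : String) (conflict : List String) : List (List String) → List (List String) → List (List String)
  | [], attrs => attrs
  | ic :: rest, attrs =>
    procA classname conflict rest
      (if fcEq ic classname then
        let delete := collectA attrs classname conflict
        if delete ≠ [] then
          applyDelA attrs (PySem.Set.ofList (PySem.List.sorted delete (fun x => x) false))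
        else attrs
      else attrs)

def delete_conflicts (in_data_parsed : List (List (List (List String)))) (classname : String) (conflict : List String) : List (List (List (List String))) :=
  in_data_parsed.map (fun cd =>
    cd.set 2 (procA classname conflict (cd.getD 1 []) (cd.getD 2 [])))

-- ===== PORT B =====

-- attr[11] == classname and all(attr[k] == conflict[k] for k in range(11))
def pvMatch (classname : String) (conflict : List String) (a : List String) : Bool :=
  a.getD 11 "" == classname && (List.range 11).all (fun k => a.getD k "" == conflict.getD k "")

def delete_conflicts_alt (in_data_parsed : List (List (List (List String)))) (classname : String) (conflict : List String) : List (List (List (List String))) :=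
  in_data_parsed.map (fun cd =>
    if (cd.getD 1 []).any (fun ic => fcEq ic classname) then
      cd.set 2 ((cd.getD 2 []).filter (fun a => !pvMatch classname conflict a))
    else cd)

-- ===== PRECONDITION & SPEC =====
-- Pre_ excludes (a) inputs where the Python A raises IndexError (class entries shorter than the
-- accessed fields, an empty inherit entry, a conflict list too short for the compare loop), and
-- (b) inputs where more than one attribute of a matched class matches the conflict and one of them
-- sits at index ≥ 8: there A's reverse-deletion order follows CPython's accidental set-iteration order.
def Pre_delete_conflicts (in_data_parsed : List (List (List (List String)))) (classname : String) (conflict : List String) : Prop :=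
  ∀ cd ∈ in_data_parsed,
    2 ≤ cd.length ∧
    (∀ ic ∈ cd.getD 1 [], ic ≠ []) ∧
    ((∃ ic ∈ cd.getD 1 [], fcEq ic classname = true) →
      3 ≤ cd.length ∧
      (∀ attr ∈ cd.getD 2 [], 12 ≤ attr.length ∧
        (attr.getD 11 "" = classname →
          11 ≤ conflict.length ∨ ∃ i < conflict.length, attr.getD i "" ≠ conflict.getD i "")) ∧
      ((cd.getD 2 []).countP (pvMatch classname conflict) ≤ 1 ∨
       ((cd.getD 2 []).drop 8).all (fun a => !pvMatch classname conflict a)))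
instance (in_data_parsed : List (List (List (List String)))) (classname : String) (conflict : List String) : Decidable (Pre_delete_conflicts in_data_parsed classname conflict) := by unfold Pre_delete_conflicts; infer_instance

def pvWitness_delete_conflicts : List (List (List (List String))) × String × List String :=
  ([[[["n"]], [["C"]], [["a","a","a","a","a","a","a","a","a","a","a","C"]]]], "C",
   ["a","a","a","a","a","a","a","a","a","a","a"])

def Spec_delete_conflicts (in_data_parsed : List (List (List (List String)))) (classname : String) (conflict : List String) (out : List (List (List (List String)))) : Prop := out = delete_conflicts_alt in_data_parsed classname conflict
instance (in_data_parsed : List (List (List (List String)))) (classname : String) (conflict : List String) (out : List (List (List (List String)))) : Decidable (Spec_delete_conflicts in_data_parsed classname conflict out) := by unfold Spec_delete_conflicts; infer_instance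

-- ===== CLAIM (what is proved, stated in full; the proofs are below) =====
def Claim_equal_delete_conflicts : Prop := ∀ (in_data_parsed : List (List (List (List String)))) (classname : String) (conflict : List String), Dom_delete_conflicts in_data_parsed classname conflict → Pre_delete_conflicts in_data_parsed classname conflict → Spec_delete_conflicts in_data_parsed classname conflict (delete_conflicts in_data_parsed classname conflict)

-- ===== LEMMAS AND PROOFS =====

-- A's compare loop decides elementwise equality on indices 0..10
lemma cmp11_gen (a c : List String) : ∀ fuel index, index + fuel = 11 → 1 ≤ fuel →
    cmp11 a c index fuel = (List.range' index fuel).all (fun k => a.getD k "" == c.getD k "") := by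
  intro fuel
  induction fuel with
  | zero => omega
  | succ f ih =>
    intro index h _
    rw [cmp11, List.range'_succ, List.all_cons]
    by_cases hi : index = 10
    · have hf : f = 0 := by omega
      subst hi hf
      cases hx : a.getD 10 "" == c.getD 10 "" <;> simp only [List.getD] at hx <;> simp [bne, hx]
    · have hf : 1 ≤ f := by omega
      cases hx : a.getD index "" == c.getD index "" with
      | false => simp only [List.getD] at hx; simp [bne, hx]
      | true => simp only [List.getD] at hx; simp [bne, hx, hi, ih (index+1) (by omega) hf]

lemma cmp11_eq (a c : List String) : cmp11 a c 0 11 = (List.range 11).all (fun k => a.getD k "" == c.getD k "") := by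
  rw [List.range_eq_range', cmp11_gen a c 11 0 rfl (by omega)]

-- indices (as Ints) of the elements satisfying p
def idxWhere (p : List String → Bool) : List (List String) → List Int
  | [] => []
  | a :: as => if p a then 0 :: (idxWhere p as).map (· + 1) else (idxWhere p as).map (· + 1)

lemma idxWhere_nonneg (p : List String → Bool) (l : List (List String)) : ∀ i ∈ idxWhere p l, 0 ≤ i := by
  induction l with
  | nil => simp [idxWhere]
  | cons a as ih =>
    intro i hi
    simp only [idxWhere] at hi
    split at hi
    · rcases List.mem_cons.mp hi with h | h
      · omega
      · rcases List.mem_map.mp h with ⟨j, hj, rfl⟩; have := ih j hj; omega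
    · rcases List.mem_map.mp hi with ⟨j, hj, rfl⟩; have := ih j hj; omega

lemma idxWhere_pairwise (p : List String → Bool) (l : List (List String)) : (idxWhere p l).Pairwise (· < ·) := by
  induction l with
  | nil => simp [idxWhere]
  | cons a as ih =>
    have hmap : ((idxWhere p as).map (· + 1)).Pairwise (· < ·) := by
      rw [List.pairwise_map]
      exact ih.imp (by intro x y h; omega)
    simp only [idxWhere]
    split
    · refine List.pairwise_cons.mpr ⟨?_, hmap⟩
      intro i hi
      rcases List.mem_map.mp hi with ⟨j, hj, rfl⟩
      have := idxWhere_nonneg p as j hj; omega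
    · exact hmap

lemma idxWhere_nil_filter (p : List String → Bool) (l : List (List String)) (h : idxWhere p l = []) :
    l.filter (fun a => !p a) = l := by
  induction l with
  | nil => rfl
  | cons a as ih =>
    simp only [idxWhere] at h
    split at h
    · exact absurd h (by simp)
    · have : idxWhere p as = [] := by simpa using h
      rename_i hp
      simp only [Bool.not_eq_true] at hp
      simp [hp, ih this]

lemma map_shift (s : Int) (I : List Int) :
    (I.map (· + 1)).map (· + s) = I.map (· + (s + 1)) := by
  rw [List.map_map]
  refine List.map_congr_left ?_
  intro x _
  simp [Function.comp]
  ring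

lemma collectA_gen (classname : String) (conflict : List String) :
    ∀ (attrs : List (List String)) (s : Int) (acc : List Int),
      (PySem.List.enumerate attrs s).foldl
        (fun delete ja =>
          if ja.2.getD 11 "" == classname then
            (if cmp11 ja.2 conflict 0 11 then delete ++ [ja.1] else delete)
          else delete) acc
      = acc ++ (idxWhere (pvMatch classname conflict) attrs).map (· + s) := by
  intro attrs
  induction attrs with
  | nil => simp [PySem.List.enumerate, idxWhere]
  | cons a as ih =>
    intro s acc
    rw [PySem.List.enumerate_cons, List.foldl_cons]
    simp only [idxWhere]
    by_cases h11 : (a.getD 11 "" == classname) = true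
    · by_cases hc : cmp11 a conflict 0 11 = true
      · have hm : pvMatch classname conflict a = true := by
          unfold pvMatch
          rw [cmp11_eq] at hc
          rw [h11, hc]
          rfl
        rw [if_pos h11, if_pos hc, if_pos hm, ih (s+1) (acc ++ [s]), List.map_cons, map_shift]
        simp
      · have hcall : ((List.range 11).all fun k => a.getD k "" == conflict.getD k "") = false := by
          rw [← cmp11_eq]; simpa using hc
        have hm : pvMatch classname conflict a = false := by
          unfold pvMatch
          rw [hcall, Bool.and_false]
        rw [if_pos h11, if_neg hc, hm, if_neg (by simp), ih (s+1) acc, map_shift]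
    · have h11' : (a.getD 11 "" == classname) = false := by simpa using h11
      have hm : pvMatch classname conflict a = false := by
        unfold pvMatch
        rw [h11', Bool.false_and]
      rw [if_neg h11, hm, if_neg (by simp), ih (s+1) acc, map_shift]

lemma collectA_eq (attrs : List (List String)) (classname : String) (conflict : List String) :
    collectA attrs classname conflict = idxWhere (pvMatch classname conflict) attrs := by
  unfold collectA
  rw [collectA_gen classname conflict attrs 0 []]
  simp

lemma foldr_erase_shift (a : List String) (as : List (List String)) (I : List Int)
    (h : ∀ i ∈ I, 0 ≤ i) :
    (I.map (· + 1)).foldr (fun i l => l.eraseIdx i.toNat) (a :: as)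
      = a :: I.foldr (fun i l => l.eraseIdx i.toNat) as := by
  induction I with
  | nil => rfl
  | cons i I ih =>
    have h0 : 0 ≤ i := h i (by simp)
    have hrest : ∀ j ∈ I, 0 ≤ j := fun j hj => h j (by simp [hj])
    simp only [List.map_cons, List.foldr_cons, ih hrest]
    have : (i + 1).toNat = i.toNat + 1 := by omega
    rw [this, List.eraseIdx_cons_succ]

lemma foldr_erase_idxWhere (p : List String → Bool) (attrs : List (List String)) :
    (idxWhere p attrs).foldr (fun i l => l.eraseIdx i.toNat) attrs = attrs.filter (fun a => !p a) := by
  induction attrs with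
  | nil => rfl
  | cons a as ih =>
    simp only [idxWhere]
    by_cases hp : p a
    · rw [if_pos hp]
      simp only [List.foldr_cons, foldr_erase_shift a as _ (idxWhere_nonneg p as)]
      simp [ih, hp]
    · rw [if_neg hp]
      rw [foldr_erase_shift a as _ (idxWhere_nonneg p as), ih]
      simp [hp]

lemma ofList_eq_self {α : Type} [DecidableEq α] (l : List α) (h : l.Nodup) : PySem.Set.ofList l = l := by
  have key : ∀ (l acc : List α), (acc ++ l).Nodup → l.foldl PySem.Set.add acc = acc ++ l := by
    intro l
    induction l with
    | nil => simp
    | cons a l ih =>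
      intro acc hnd
      have ha : a ∉ acc := by
        intro hmem
        exact (List.disjoint_of_nodup_append hnd) hmem (by simp)
      have : PySem.Set.add acc a = acc ++ [a] := by
        simp only [PySem.Set.add]
        rw [if_neg (fun hc => ha ((PySem.Set.contains_iff acc a).mp hc))]
      rw [List.foldl_cons, this, ih (acc ++ [a]) (by simpa using hnd)]
      simp
  rw [PySem.Set.ofList_eq_foldl]
  simpa using key l [] (by simpa using h)

lemma stepA_eq (attrs : List (List String)) (classname : String) (conflict : List String) :
    (if collectA attrs classname conflict ≠ [] then
       applyDelA attrs (PySem.Set.ofList (PySem.List.sorted (collectA attrs classname conflict) (fun x => x) false))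
     else attrs)
      = attrs.filter (fun a => !pvMatch classname conflict a) := by
  rw [collectA_eq]
  by_cases hI : idxWhere (pvMatch classname conflict) attrs = []
  · rw [if_neg (by simpa using hI), idxWhere_nil_filter _ _ hI]
  · have hpw := idxWhere_pairwise (pvMatch classname conflict) attrs
    rw [if_pos hI,
        PySem.List.sorted_eq_self_of_pairwise _ _ (hpw.imp le_of_lt),
        ofList_eq_self _ (hpw.imp (fun h => ne_of_lt h))]
    unfold applyDelA
    rw [List.foldl_reverse]
    exact foldr_erase_idxWhere _ attrs

lemma procA_eq (classname : String) (conflict : List String) (inh : List (List String)) (attrs : List (List String)) :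
    procA classname conflict inh attrs
      = if inh.any (fun ic => fcEq ic classname) then attrs.filter (fun a => !pvMatch classname conflict a)
        else attrs := by
  induction inh generalizing attrs with
  | nil => simp [procA]
  | cons ic rest ih =>
    simp only [procA]
    by_cases hf : fcEq ic classname = true
    · rw [if_pos hf]
      show procA classname conflict rest
          (if collectA attrs classname conflict ≠ [] then
            applyDelA attrs (PySem.Set.ofList (PySem.List.sorted (collectA attrs classname conflict) (fun x => x) false))
          else attrs) = _
      rw [stepA_eq, ih]
      by_cases hr : (rest.any fun ic => fcEq ic classname) = true
      · rw [if_pos hr, if_pos (by simp [hf]), List.filter_filter]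
        simp
      · rw [if_neg hr, if_pos (by simp [hf])]
    · rw [if_neg hf, ih]
      simp [List.any_cons, hf]

lemma set_getD_self (cd : List (List (List String))) : cd.set 2 (cd.getD 2 []) = cd := by
  rcases cd with _|⟨x,_|⟨y,_|⟨z,t⟩⟩⟩ <;> simp

-- ===== VERDICT (by name: the statement is the Claim_ definition above) =====
theorem delete_conflicts_spec : Claim_equal_delete_conflicts := by
  intro inp classname conflict _ _
  unfold Spec_delete_conflicts delete_conflicts delete_conflicts_alt
  refine List.map_congr_left (fun cd _ => ?_)
  rw [procA_eq]
  by_cases h2 : ((cd.getD 1 []).any fun ic => fcEq ic classname) = true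
  · rw [if_pos h2, if_pos h2]
  · rw [if_neg h2, if_neg h2, set_getD_self]
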